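-- pv_equiv track=rewrite | github.com/Wxl-stars/AnyDoor | datasets/private_data/modules/annotation/admap_anno.py | seq_to_pt_seq
-- ===== SOURCE A (Python) =====
-- def seq_to_pt_seq(seq):
--     pts_seq = []
--     fork = None  # 只考虑 二分叉
--     for pt in seq:
--         pts_seq.append(pt[0])
--         if fork is None:  # 前面没有 fork
--             if pt[1] == "FORK":  # 当前点是 FORK
--                 fork = pt[0]
--         else:  # 前面有 FORK
--             if pt[1] == "END":  # 当前点是 END, 就复制一个前面的 FORK
--                 pts_seq.append(fork)
--     return pts_seq
-- ===== SOURCE B (Python) =====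
-- def seq_to_pt_seq(seq):
--     # pass 1: locate the first FORK (index and coordinate), if any
--     fork_idx = None
--     fork_pt = None
--     for i, pt in enumerate(seq):
--         if pt[1] == "FORK":
--             fork_idx, fork_pt = i, pt[0]
--             break
--     # pass 2: emit every point; after the fork, duplicate the fork point at each END
--     out = []
--     for i, pt in enumerate(seq):
--         out.append(pt[0])
--         if fork_pt is not None and i > fork_idx and pt[1] == "END":
--             out.append(fork_pt)
--     return out
-- ===== Notes on version B (the rewrite author's own statement) =====
-- stated objective: alternative
-- what changed: Replaces the running fork-state variable with a separate first pass that locates the first FORK's index and coordinate, then a second index-guarded pass that emits points and duplicates the fork point at ENDs strictly after it.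
import Mathlib
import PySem

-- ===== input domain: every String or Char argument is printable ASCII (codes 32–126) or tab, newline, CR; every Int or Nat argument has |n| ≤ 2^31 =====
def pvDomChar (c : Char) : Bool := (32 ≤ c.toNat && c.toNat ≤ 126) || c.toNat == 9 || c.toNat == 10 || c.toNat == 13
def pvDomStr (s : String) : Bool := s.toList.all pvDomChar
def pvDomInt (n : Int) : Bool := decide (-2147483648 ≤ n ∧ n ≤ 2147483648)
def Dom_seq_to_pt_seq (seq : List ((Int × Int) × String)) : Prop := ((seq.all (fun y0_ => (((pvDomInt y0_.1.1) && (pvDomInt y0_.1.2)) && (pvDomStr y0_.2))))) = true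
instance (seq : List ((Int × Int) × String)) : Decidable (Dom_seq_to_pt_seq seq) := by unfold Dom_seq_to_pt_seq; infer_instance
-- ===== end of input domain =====

-- B replaces A's running fork-state variable with a first pass locating the first FORK
-- (index + coordinate) and a second index-guarded pass (objective: alternative decomposition).


-- ===== PORT A =====
-- A's loop: state = (pts_seq accumulator, fork : Option point)
def seqToPtGoA : List ((Int × Int) × String) → List (Int × Int) → Option (Int × Int) → List (Int × Int)
  | [], acc, _ => acc
  | pt :: rest, acc, fork =>
    match fork with
    | none =>
      if pt.2 = "FORK" then seqToPtGoA rest (acc ++ [pt.1]) (some pt.1)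
      else seqToPtGoA rest (acc ++ [pt.1]) none
    | some f =>
      if pt.2 = "END" then seqToPtGoA rest (acc ++ [pt.1] ++ [f]) (some f)
      else seqToPtGoA rest (acc ++ [pt.1]) (some f)

def seq_to_pt_seq (seq : List ((Int × Int) × String)) : List (Int × Int) :=
  seqToPtGoA seq [] none

-- ===== PORT B =====
-- pass 1: first FORK's (index, coordinate), if any
def seqToPtFindFork : List ((Int × Int) × String) → Nat → Option (Nat × (Int × Int))
  | [], _ => none
  | pt :: rest, i => if pt.2 = "FORK" then some (i, pt.1) else seqToPtFindFork rest (i + 1)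

-- pass 2: emit pt[0]; duplicate fork point at ENDs with index strictly after the fork
def seqToPtGoB : List ((Int × Int) × String) → Nat → Option (Nat × (Int × Int)) → List (Int × Int) → List (Int × Int)
  | [], _, _, out => out
  | pt :: rest, i, fo, out =>
    match fo with
    | some (idx, f) =>
      if idx < i ∧ pt.2 = "END" then seqToPtGoB rest (i + 1) fo (out ++ [pt.1] ++ [f])
      else seqToPtGoB rest (i + 1) fo (out ++ [pt.1])
    | none => seqToPtGoB rest (i + 1) fo (out ++ [pt.1])

def seq_to_pt_seq_alt (seq : List ((Int × Int) × String)) : List (Int × Int) :=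
  seqToPtGoB seq 0 (seqToPtFindFork seq 0) []

-- ===== PRECONDITION & SPEC =====
def Spec_seq_to_pt_seq (seq : List ((Int × Int) × String)) (out : List (Int × Int)) : Prop := out = seq_to_pt_seq_alt seq
instance (seq : List ((Int × Int) × String)) (out : List (Int × Int)) : Decidable (Spec_seq_to_pt_seq seq out) := by unfold Spec_seq_to_pt_seq; infer_instance

-- ===== CLAIM (what is proved, stated in full; the proofs are below) =====
def Claim_equal_seq_to_pt_seq : Prop := ∀ (seq : List ((Int × Int) × String)), Dom_seq_to_pt_seq seq → Spec_seq_to_pt_seq seq (seq_to_pt_seq seq)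

-- ===== LEMMAS AND PROOFS =====

theorem seqToPtGoA_acc (seq : List ((Int × Int) × String)) (acc : List (Int × Int))
    (fork : Option (Int × Int)) : seqToPtGoA seq acc fork = acc ++ seqToPtGoA seq [] fork := by
  induction seq generalizing acc fork with
  | nil => simp [seqToPtGoA]
  | cons pt rest ih =>
    cases fork with
    | none =>
      by_cases h : pt.2 = "FORK" <;>
        simp [seqToPtGoA, h, ih (acc ++ [pt.1]), ih [pt.1]]
    | some f =>
      by_cases h : pt.2 = "END" <;>
        simp [seqToPtGoA, h, ih (acc ++ [pt.1]), ih [pt.1], ih (acc ++ [pt.1, f]),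
          ih [pt.1, f]]

theorem seqToPtGoB_acc (seq : List ((Int × Int) × String)) (i : Nat)
    (fo : Option (Nat × (Int × Int))) (out : List (Int × Int)) :
    seqToPtGoB seq i fo out = out ++ seqToPtGoB seq i fo [] := by
  induction seq generalizing i out with
  | nil => simp [seqToPtGoB]
  | cons pt rest ih =>
    cases fo with
    | none => simp [seqToPtGoB, ih (i + 1) (out ++ [pt.1]), ih (i + 1) [pt.1]]
    | some p =>
      by_cases h : p.1 < i ∧ pt.2 = "END" <;>
        simp [seqToPtGoB, h, ih (i + 1) (out ++ [pt.1]), ih (i + 1) [pt.1],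
          ih (i + 1) (out ++ [pt.1, p.2]), ih (i + 1) [pt.1, p.2]]

theorem seqToPtFindFork_ge (seq : List ((Int × Int) × String)) (j idx : Nat) (f : Int × Int)
    (h : seqToPtFindFork seq j = some (idx, f)) : j ≤ idx := by
  induction seq generalizing j with
  | nil => simp [seqToPtFindFork] at h
  | cons pt rest ih =>
    by_cases hp : pt.2 = "FORK"
    · simp [seqToPtFindFork, hp] at h
      omega
    · simp [seqToPtFindFork, hp] at h
      have := ih (j + 1) h
      omega

-- after the fork: A with state `some f` equals B's suffix loop at any index i > idx
theorem goA_eq_goB_after (seq : List ((Int × Int) × String)) (f : Int × Int) (idx i : Nat)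
    (hlt : idx < i) : seqToPtGoA seq [] (some f) = seqToPtGoB seq i (some (idx, f)) [] := by
  induction seq generalizing i with
  | nil => simp [seqToPtGoA, seqToPtGoB]
  | cons pt rest ih =>
    by_cases h : pt.2 = "END"
    · rw [seqToPtGoA, seqToPtGoB,
        if_pos h, if_pos (show idx < i ∧ pt.2 = "END" from ⟨hlt, h⟩)]
      rw [seqToPtGoA_acc, seqToPtGoB_acc, ih (i + 1) (by omega)]
    · rw [seqToPtGoA, seqToPtGoB,
        if_neg h, if_neg (show ¬ (idx < i ∧ pt.2 = "END") from fun hc => h hc.2)]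
      rw [seqToPtGoA_acc, seqToPtGoB_acc, ih (i + 1) (by omega)]

theorem goA_eq_goB (seq : List ((Int × Int) × String)) (i : Nat) :
    seqToPtGoA seq [] none = seqToPtGoB seq i (seqToPtFindFork seq i) [] := by
  induction seq generalizing i with
  | nil => simp [seqToPtGoA, seqToPtGoB]
  | cons pt rest ih =>
    by_cases hp : pt.2 = "FORK"
    · rw [seqToPtGoA, seqToPtFindFork]
      simp only [if_pos hp, seqToPtGoB]
      have : ¬ (i < i ∧ pt.2 = "END") := fun hc => absurd hc.1 (lt_irrefl i)
      rw [if_neg this]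
      rw [seqToPtGoA_acc, seqToPtGoB_acc, goA_eq_goB_after rest pt.1 i (i + 1) (by omega)]
    · rw [seqToPtGoA, seqToPtFindFork]
      simp only [if_neg hp]
      rcases hf : seqToPtFindFork rest (i + 1) with _ | ⟨idx, f⟩
      · simp only [seqToPtGoB]
        rw [seqToPtGoA_acc, seqToPtGoB_acc]
        have := ih (i + 1)
        rw [hf] at this
        rw [this]
      · have hge := seqToPtFindFork_ge rest (i + 1) idx f hf
        simp only [seqToPtGoB]
        have : ¬ (idx < i ∧ pt.2 = "END") := by
          rintro ⟨h1, _⟩; omega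
        rw [if_neg this]
        rw [seqToPtGoA_acc, seqToPtGoB_acc]
        have := ih (i + 1)
        rw [hf] at this
        rw [this]

-- ===== VERDICT (by name: the statement is the Claim_ definition above) =====
theorem seq_to_pt_seq_spec : Claim_equal_seq_to_pt_seq := by
  intro seq _
  unfold Spec_seq_to_pt_seq seq_to_pt_seq seq_to_pt_seq_alt
  exact goA_eq_goB seq 0
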